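-- pv_equiv track=rewrite | github.com/EasyCodie/Veridict | core/agents/utils/risk_taxonomy.py | calculate_overall_rating
-- ===== SOURCE A (Python) =====
-- from enum import Enum
-- from typing import Any
--
-- class Severity(str, Enum):
--     """Severity levels for identified risks."""
--
--     CRITICAL = "critical"
--     """Immediate attention required. Could result in significant financial or legal exposure."""
--
--     HIGH = "high"
--     """Significant risk that should be addressed before signing."""
--
--     MEDIUM = "medium"
--     """Notable concern that warrants review but may be acceptable."""
--
--     LOW = "low"
--     """Minor issue with limited impact."""
--
-- class OverallRiskRating(str, Enum):
--     """Overall risk rating for a clause or contract."""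
--
--     CLEAN = "clean"
--     """No risks identified."""
--
--     MINOR_ISSUES = "minor_issues"
--     """Only low-severity risks present."""
--
--     SIGNIFICANT_ISSUES = "significant_issues"
--     """Medium or high-severity risks present."""
--
--     CRITICAL_ISSUES = "critical_issues"
--     """At least one critical-severity risk present."""
--
-- def calculate_overall_rating(risks: list[dict[str, Any]]) -> OverallRiskRating:
--     """Calculate overall risk rating from a list of identified risks.
--
--     The rating is determined by the highest severity risk present:
--     - Any CRITICAL → CRITICAL_ISSUES
--     - Any HIGH or MEDIUM → SIGNIFICANT_ISSUES
--     - Only LOW → MINOR_ISSUES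
--     - No risks → CLEAN
--
--     Args:
--         risks: List of risk dictionaries with 'severity' field.
--
--     Returns:
--         OverallRiskRating enum value.
--     """
--     if not risks:
--         return OverallRiskRating.CLEAN
--
--     severities = set()
--     for risk in risks:
--         severity_str = risk.get("severity", "low")
--         try:
--             severities.add(Severity(severity_str.lower()))
--         except ValueError:
--             severities.add(Severity.LOW)
--
--     if Severity.CRITICAL in severities:
--         return OverallRiskRating.CRITICAL_ISSUES
--
--     if Severity.HIGH in severities or Severity.MEDIUM in severities:
--         return OverallRiskRating.SIGNIFICANT_ISSUES
--
--     if Severity.LOW in severities: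
--         return OverallRiskRating.MINOR_ISSUES
--
--     return OverallRiskRating.CLEAN
-- ===== SOURCE B (Python) =====
-- _RANK = {"critical": 4, "high": 3, "medium": 2}
--
-- def calculate_overall_rating(risks):
--     """Running-maximum rank instead of collecting a set of severities."""
--     if not risks:
--         return "clean"
--     max_rank = 0
--     for risk in risks:
--         max_rank = max(max_rank, _RANK.get(risk.get("severity", "low").lower(), 1))
--     if max_rank >= 4:
--         return "critical_issues"
--     if max_rank >= 2:
--         return "significant_issues"
--     return "minor_issues"
-- ===== Notes on version B (the rewrite author's own statement) =====
-- stated objective: simpler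
-- what changed: Replaces the severity set plus four membership tests (with enum construction and ValueError handling) by a single running integer maximum of severity ranks looked up in one table, mapped to the rating by two threshold comparisons.
import Mathlib
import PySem

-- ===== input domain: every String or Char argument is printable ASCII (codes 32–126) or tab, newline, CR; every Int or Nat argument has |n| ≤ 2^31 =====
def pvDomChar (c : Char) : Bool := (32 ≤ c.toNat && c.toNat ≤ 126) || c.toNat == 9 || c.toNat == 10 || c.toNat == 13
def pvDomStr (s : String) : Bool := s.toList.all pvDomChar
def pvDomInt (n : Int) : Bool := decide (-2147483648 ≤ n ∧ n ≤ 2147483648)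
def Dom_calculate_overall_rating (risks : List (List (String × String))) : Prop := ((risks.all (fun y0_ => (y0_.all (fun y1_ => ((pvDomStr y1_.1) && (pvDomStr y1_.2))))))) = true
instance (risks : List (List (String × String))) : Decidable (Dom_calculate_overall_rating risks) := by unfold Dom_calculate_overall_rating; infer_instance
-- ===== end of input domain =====

-- B replaces A's set of parsed severities and four membership tests by a running
-- integer maximum of ranks looked up in one table (objective: simpler).

-- ===== PORT A =====
-- Severity(severity_str.lower()) with 'except ValueError: Severity.LOW':
-- the parsed severity, always one of the four enum values.
def pySevOf (risk : List (String × String)) : String :=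
  let s := PySem.Str.lower (PySem.Dict.getD (PySem.Dict.mk risk) "severity" "low")
  if s = "critical" ∨ s = "high" ∨ s = "medium" ∨ s = "low" then s else "low"

def calculate_overall_rating (risks : List (List (String × String))) : String :=
  if risks = [] then "clean"
  else
    let severities : PySem.Set String :=
      risks.foldl (fun acc r => PySem.Set.add acc (pySevOf r)) PySem.Set.empty
    if PySem.Set.contains severities "critical" then "critical_issues"
    else if PySem.Set.contains severities "high" || PySem.Set.contains severities "medium" then
      "significant_issues"
    else if PySem.Set.contains severities "low" then "minor_issues"
    else "clean"

-- ===== PORT B =====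
-- _RANK.get(risk.get("severity", "low").lower(), 1)
def rankOf (risk : List (String × String)) : Int :=
  PySem.Dict.getD (PySem.Dict.mk [("critical", (4 : Int)), ("high", 3), ("medium", 2)])
    (PySem.Str.lower (PySem.Dict.getD (PySem.Dict.mk risk) "severity" "low")) 1

def calculate_overall_rating_alt (risks : List (List (String × String))) : String :=
  if risks = [] then "clean"
  else
    let max_rank : Int := risks.foldl (fun m r => max m (rankOf r)) 0
    if max_rank ≥ 4 then "critical_issues"
    else if max_rank ≥ 2 then "significant_issues"
    else "minor_issues"

-- ===== PRECONDITION & SPEC =====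
def Spec_calculate_overall_rating (risks : List (List (String × String))) (out : String) : Prop := out = calculate_overall_rating_alt risks
instance (risks : List (List (String × String))) (out : String) : Decidable (Spec_calculate_overall_rating risks out) := by unfold Spec_calculate_overall_rating; infer_instance

-- ===== CLAIM (what is proved, stated in full; the proofs are below) =====
def Claim_equal_calculate_overall_rating : Prop := ∀ (risks : List (List (String × String))), Dom_calculate_overall_rating risks → Spec_calculate_overall_rating risks (calculate_overall_rating risks)

-- ===== LEMMAS AND PROOFS =====

-- the rank B assigns to a parsed severity string
def rk (s : String) : Int :=
  if s = "critical" then 4 else if s = "high" then 3 else if s = "medium" then 2 else 1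

theorem lookup_rk (s : String) :
    PySem.Dict.getD (PySem.Dict.mk [("critical", (4 : Int)), ("high", 3), ("medium", 2)]) s 1
    = (if s = "critical" then 4 else if s = "high" then 3 else if s = "medium" then 2 else 1) := by
  rw [PySem.Dict.getD]
  rw [PySem.Dict.get?_mk_cons, PySem.Dict.get?_mk_cons, PySem.Dict.get?_mk_cons]
  by_cases h1 : s = "critical"
  · subst h1; simp
  · by_cases h2 : s = "high"
    · subst h2; simp
    · by_cases h3 : s = "medium"
      · subst h3; simp
      · have n1 : ("critical" == s) = false := beq_false_of_ne (Ne.symm h1)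
        have n2 : ("high" == s) = false := beq_false_of_ne (Ne.symm h2)
        have n3 : ("medium" == s) = false := beq_false_of_ne (Ne.symm h3)
        rw [n1, n2, n3, if_neg h1, if_neg h2, if_neg h3]
        simp [PySem.Dict.get?]

theorem pySevOf_cases (r : List (String × String)) :
    pySevOf r = "critical" ∨ pySevOf r = "high" ∨ pySevOf r = "medium" ∨ pySevOf r = "low" := by
  unfold pySevOf
  set s := PySem.Str.lower (PySem.Dict.getD (PySem.Dict.mk r) "severity" "low") with hs
  by_cases h : s = "critical" ∨ s = "high" ∨ s = "medium" ∨ s = "low"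
  · rw [if_pos h]; exact h
  · rw [if_neg h]; simp

theorem rankOf_eq (r : List (String × String)) : rankOf r = rk (pySevOf r) := by
  unfold rankOf pySevOf
  rw [lookup_rk]
  set s := PySem.Str.lower (PySem.Dict.getD (PySem.Dict.mk r) "severity" "low") with hs
  unfold rk
  by_cases h : s = "critical" ∨ s = "high" ∨ s = "medium" ∨ s = "low"
  · rw [if_pos h]
  · rw [if_neg h]
    have h1 : s ≠ "critical" := fun hx => h (Or.inl hx)
    have h2 : s ≠ "high" := fun hx => h (Or.inr (Or.inl hx))
    have h3 : s ≠ "medium" := fun hx => h (Or.inr (Or.inr (Or.inl hx)))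
    rw [if_neg h1, if_neg h2, if_neg h3]
    simp

theorem rk_four_iff (s : String) : 4 ≤ rk s ↔ s = "critical" := by
  unfold rk; split_ifs <;> simp_all

theorem rk_two_iff (s : String) :
    2 ≤ rk s ↔ (s = "critical" ∨ s = "high" ∨ s = "medium") := by
  unfold rk; split_ifs <;> simp_all

-- A's set accumulator, characterised: what ends up in it
theorem mem_fold_add (l : List (List (String × String))) (S : PySem.Set String) (x : String) :
    (x ∈ l.foldl (fun acc r => PySem.Set.add acc (pySevOf r)) S
      ↔ x ∈ S ∨ ∃ r ∈ l, pySevOf r = x) := by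
  induction l generalizing S with
  | nil => simp
  | cons r rest ih =>
      simp only [List.foldl_cons, ih, PySem.Set.mem_add, List.mem_cons]
      constructor
      · rintro (((h | h) | ⟨r', hr', h⟩))
        · exact Or.inl h
        · exact Or.inr ⟨r, Or.inl rfl, h.symm⟩
        · exact Or.inr ⟨r', Or.inr hr', h⟩
      · rintro (h | ⟨r', (rfl | hr'), h⟩)
        · exact Or.inl (Or.inl h)
        · exact Or.inl (Or.inr h.symm)
        · exact Or.inr ⟨r', hr', h⟩

-- B's running maximum, characterised: what bounds it from below
theorem le_fold_max (l : List (List (String × String))) (k m : Int) :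
    (k ≤ l.foldl (fun m r => max m (rankOf r)) m ↔ k ≤ m ∨ ∃ r ∈ l, k ≤ rankOf r) := by
  induction l generalizing m with
  | nil => simp
  | cons r rest ih =>
      simp only [List.foldl_cons, ih, le_max_iff, List.mem_cons]
      constructor
      · rintro ((h | h) | ⟨r', hr', h⟩)
        · exact Or.inl h
        · exact Or.inr ⟨r, Or.inl rfl, h⟩
        · exact Or.inr ⟨r', Or.inr hr', h⟩
      · rintro (h | ⟨r', (rfl | hr'), h⟩)
        · exact Or.inl (Or.inl h)
        · exact Or.inl (Or.inr h)
        · exact Or.inr ⟨r', hr', h⟩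

-- ===== VERDICT (by name: the statement is the Claim_ definition above) =====
theorem calculate_overall_rating_spec : Claim_equal_calculate_overall_rating := by
  intro risks _
  unfold Spec_calculate_overall_rating calculate_overall_rating calculate_overall_rating_alt
  cases risks with
  | nil => rfl
  | cons r rest =>
      simp only [reduceCtorEq, if_false]
      set l := r :: rest with hl
      set S' := l.foldl (fun acc r => PySem.Set.add acc (pySevOf r)) PySem.Set.empty with hS
      set M := l.foldl (fun m r => max m (rankOf r)) 0 with hM
      have Hmem : ∀ x : String, (x ∈ S' ↔ ∃ r' ∈ l, pySevOf r' = x) := by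
        intro x
        rw [hS, mem_fold_add]
        simp [PySem.Set.empty]
      have Hle : ∀ k : Int, 1 ≤ k → (k ≤ M ↔ ∃ r' ∈ l, k ≤ rankOf r') := by
        intro k hk
        rw [hM, le_fold_max]
        constructor
        · rintro (h | h)
          · omega
          · exact h
        · exact Or.inr
      have e4 : "critical" ∈ S' ↔ 4 ≤ M := by
        rw [Hmem, Hle 4 (by omega)]
        constructor
        · rintro ⟨r', hr', h⟩
          exact ⟨r', hr', by rw [rankOf_eq, rk_four_iff]; exact h⟩
        · rintro ⟨r', hr', h⟩
          rw [rankOf_eq, rk_four_iff] at h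
          exact ⟨r', hr', h⟩
      have e2 : ("critical" ∈ S' ∨ "high" ∈ S' ∨ "medium" ∈ S') ↔ 2 ≤ M := by
        rw [Hmem, Hmem, Hmem, Hle 2 (by omega)]
        constructor
        · rintro (⟨r', hr', h⟩ | ⟨r', hr', h⟩ | ⟨r', hr', h⟩)
          · exact ⟨r', hr', by rw [rankOf_eq, rk_two_iff]; exact Or.inl h⟩
          · exact ⟨r', hr', by rw [rankOf_eq, rk_two_iff]; exact Or.inr (Or.inl h)⟩
          · exact ⟨r', hr', by rw [rankOf_eq, rk_two_iff]; exact Or.inr (Or.inr h)⟩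
        · rintro ⟨r', hr', h⟩
          rw [rankOf_eq, rk_two_iff] at h
          rcases h with h | h | h
          · exact Or.inl ⟨r', hr', h⟩
          · exact Or.inr (Or.inl ⟨r', hr', h⟩)
          · exact Or.inr (Or.inr ⟨r', hr', h⟩)
      by_cases h4 : 4 ≤ M
      · rw [if_pos (by simp [e4.mpr h4]), if_pos h4]
      · have hc : "critical" ∉ S' := fun h => h4 (e4.mp h)
        rw [if_neg (by simp [hc]), if_neg h4]
        by_cases h2 : 2 ≤ M
        · have hhm : (PySem.Set.contains S' "high" || PySem.Set.contains S' "medium") = true := by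
            rcases e2.mpr h2 with h | h | h
            · exact absurd h hc
            · simp [h]
            · simp [h]
          rw [if_pos hhm, if_pos h2]
        · have hh : "high" ∉ S' := fun h => h2 (e2.mp (Or.inr (Or.inl h)))
          have hm : "medium" ∉ S' := fun h => h2 (e2.mp (Or.inr (Or.inr h)))
          rw [if_neg (by simp [hh, hm]), if_neg h2]
          have hlow : "low" ∈ S' := by
            rcases pySevOf_cases r with h | h | h | h
            · exact absurd ((Hmem "critical").mpr ⟨r, List.mem_cons_self, h⟩) hc
            · exact absurd ((Hmem "high").mpr ⟨r, List.mem_cons_self, h⟩) hh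
            · exact absurd ((Hmem "medium").mpr ⟨r, List.mem_cons_self, h⟩) hm
            · exact (Hmem "low").mpr ⟨r, List.mem_cons_self, h⟩
          rw [if_pos (by simp [hlow])]
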